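-- pv_equiv track=rewrite | github.com/potatodevyjh/Algorithms | W.5 Brute Force/프로그래머스/(실패)피로도.py | solution
-- ===== SOURCE A (Python) =====
-- def solution(k, dungeons):
--     dungeons.sort()
--     answer = -1
--     for i in range(len(dungeons)):
--         cnt = 0
--         for j in range(len(dungeons) - i):
--             if k >= dungeons[j][0]:
--                 k- dungeons[j][1]
--                 cnt += 1
--         if answer < cnt:
--             answer = cnt
--     return answer
-- ===== SOURCE B (Python) =====
-- def solution(k, dungeons):
--     # Since A never updates k, every dungeon check uses the original k; the
--     # maximum over A's shrinking prefixes is always the full-list count.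
--     dungeons.sort()  # kept for A's in-place-sort side effect on the argument
--     if not dungeons:
--         return -1
--     return sum(1 for d in dungeons if k >= d[0])
-- ===== Notes on version B (the rewrite author's own statement) =====
-- stated objective: faster
-- what changed: A's nested loops recount a shrinking prefix n times although k never changes; B replaces them with one pass counting the dungeons with k >= d[0] (the maximum always occurs at the full prefix), returning -1 only for an empty list.
import Mathlib
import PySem

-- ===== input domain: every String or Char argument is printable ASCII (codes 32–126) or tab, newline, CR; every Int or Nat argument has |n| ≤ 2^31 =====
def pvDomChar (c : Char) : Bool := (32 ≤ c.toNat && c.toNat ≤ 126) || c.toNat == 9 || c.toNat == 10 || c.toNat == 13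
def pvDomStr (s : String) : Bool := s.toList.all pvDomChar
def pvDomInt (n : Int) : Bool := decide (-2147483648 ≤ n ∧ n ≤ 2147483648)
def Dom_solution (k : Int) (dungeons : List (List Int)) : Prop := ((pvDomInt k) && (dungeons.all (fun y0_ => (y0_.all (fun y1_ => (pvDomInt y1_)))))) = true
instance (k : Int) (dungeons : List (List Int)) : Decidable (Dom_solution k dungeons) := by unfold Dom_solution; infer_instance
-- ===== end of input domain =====

-- B: A's nested loops (which never update k) become one counting pass over the sorted list; the sort is kept only for A's in-place mutation of `dungeons`, which this return-value equivalence does not model.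


-- ===== PORT A =====
def solution (k : Int) (dungeons : List (List Int)) : Int :=
  let ds := PySem.List.sorted dungeons (fun x => x) false
  (PySem.List.pyRange 0 (ds.length : Int) 1).foldl (fun answer i =>
    let cnt := (PySem.List.pyRange 0 ((ds.length : Int) - i) 1).foldl (fun cnt j =>
      let d := PySem.List.pyGetD ds j []
      if PySem.List.pyGetD d 0 0 ≤ k then
        let _ := k - PySem.List.pyGetD d 1 0   -- Python's dead `k - dungeons[j][1]`
        cnt + 1
      else cnt) 0
    if answer < cnt then cnt else answer) (-1)

-- ===== PORT B =====
def solution_alt (k : Int) (dungeons : List (List Int)) : Int :=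
  let ds := PySem.List.sorted dungeons (fun x => x) false
  if ds.isEmpty then -1
  else (ds.map (fun d => if PySem.List.pyGetD d 0 0 ≤ k then (1 : Int) else 0)).sum

-- ===== PRECONDITION & SPEC =====
-- Pre_ excludes exactly the inputs where Python A raises IndexError: an empty dungeon
-- (d[0] fails), or a matching dungeon (d[0] <= k) with no second element (d[1] fails).
def Pre_solution (k : Int) (dungeons : List (List Int)) : Prop :=
  ∀ d ∈ dungeons, d ≠ [] ∧ (d.headI ≤ k → 2 ≤ d.length)
instance (k : Int) (dungeons : List (List Int)) : Decidable (Pre_solution k dungeons) := by unfold Pre_solution; infer_instance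

def pvWitness_solution : Int × List (List Int) := (3, [[1, 2], [4, 5], [2, 9]])

def Spec_solution (k : Int) (dungeons : List (List Int)) (out : Int) : Prop := out = solution_alt k dungeons
instance (k : Int) (dungeons : List (List Int)) (out : Int) : Decidable (Spec_solution k dungeons out) := by unfold Spec_solution; infer_instance

-- ===== CLAIM (what is proved, stated in full; the proofs are below) =====
def Claim_equal_solution : Prop := ∀ (k : Int) (dungeons : List (List Int)), Dom_solution k dungeons → Pre_solution k dungeons → Spec_solution k dungeons (solution k dungeons)
-- ===== LEMMAS AND PROOFS =====

-- the inner-loop body as a named step function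
def pvStep (k : Int) (cnt : Int) (d : List Int) : Int :=
  if PySem.List.pyGetD d 0 0 ≤ k then cnt + 1 else cnt

lemma pvFoldl_ge {α : Type} (g : Int → α → Int) (hg : ∀ x d, x ≤ g x d)
    (l : List α) (x : Int) : x ≤ l.foldl g x := by
  induction l generalizing x with
  | nil => exact le_refl x
  | cons d t ih => exact le_trans (hg x d) (ih (g x d))

lemma pvStep_ge (k : Int) : ∀ (x : Int) (d : List Int), x ≤ pvStep k x d := by
  intro x d; unfold pvStep; split <;> omega

-- the inner loop as a function of its Int upper bound
def pvInner (k : Int) (ds : List (List Int)) (b : Int) : Int :=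
  (PySem.List.pyRange 0 b 1).foldl (fun cnt j => pvStep k cnt (PySem.List.pyGetD ds j [])) 0

lemma pvInner_nonneg (k : Int) (ds : List (List Int)) (b : Int) : 0 ≤ pvInner k ds b :=
  pvFoldl_ge _ (fun x _ => pvStep_ge k x _) _ 0

lemma pvInner_mono (k : Int) (ds : List (List Int)) {b b' : Int} (h : b ≤ b') :
    pvInner k ds b ≤ pvInner k ds b' := by
  by_cases hb : 0 ≤ b
  · unfold pvInner
    rw [PySem.List.pyRange_one_append 0 b b' hb h, List.foldl_append]
    exact pvFoldl_ge _ (fun x _ => pvStep_ge k x _) _ _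
  · unfold pvInner
    rw [PySem.List.pyRange_one_eq_nil (show b ≤ 0 by omega)]
    exact pvFoldl_ge _ (fun x _ => pvStep_ge k x _) _ 0

lemma pvInner_full (k : Int) (ds : List (List Int)) :
    pvInner k ds (ds.length : Int) = ds.foldl (pvStep k) 0 :=
  PySem.List.foldl_pyRange_zero_pyGetD ds [] (pvStep k) 0

-- folding the max-update over later iterations keeps an already-maximal answer
lemma pvOuter_const (cnt : Int → Int) (a : Int) (l : List Int)
    (h : ∀ i ∈ l, cnt i ≤ a) :
    l.foldl (fun ans i => if ans < cnt i then cnt i else ans) a = a := by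
  induction l with
  | nil => rfl
  | cons i t ih =>
      have hi : cnt i ≤ a := h i (by simp)
      simp only [List.foldl_cons]
      rw [if_neg (by omega)]
      exact ih (fun j hj => h j (by simp [hj]))

lemma pvSum_eq_foldl (k : Int) (ds : List (List Int)) :
    (ds.map (fun d => if PySem.List.pyGetD d 0 0 ≤ k then (1 : Int) else 0)).sum
      = ds.foldl (pvStep k) 0 := by
  have h : ∀ x : Int, ds.foldl (pvStep k) x
      = x + (ds.map (fun d => if PySem.List.pyGetD d 0 0 ≤ k then (1 : Int) else 0)).sum := by
    induction ds with
    | nil => intro x; simp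
    | cons d t ih =>
        intro x
        simp only [List.foldl_cons, List.map_cons, List.sum_cons, ih]
        unfold pvStep; split <;> omega
  rw [h 0]; omega

-- the A-side outer loop (over any list ds) equals the B-side expression
lemma pv_main (k : Int) (ds : List (List Int)) :
    (PySem.List.pyRange 0 (ds.length : Int) 1).foldl (fun answer i =>
        if answer < pvInner k ds ((ds.length : Int) - i) then
          pvInner k ds ((ds.length : Int) - i) else answer) (-1)
      = if ds.isEmpty then (-1 : Int)
        else (ds.map (fun d => if PySem.List.pyGetD d 0 0 ≤ k then (1 : Int) else 0)).sum := by
  cases hn : ds with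
  | nil => simp [PySem.List.pyRange_one_eq_nil]
  | cons d t =>
      rw [← hn]
      have hlen : (0 : Int) < (ds.length : Int) := by rw [hn]; simp
      rw [PySem.List.pyRange_one_cons hlen]
      simp only [List.foldl_cons, sub_zero]
      rw [if_pos (by have := pvInner_nonneg k ds (ds.length : Int); omega)]
      rw [pvOuter_const _ _ _ (fun i hi => by
        have hmem := (PySem.List.mem_pyRange_one).1 hi
        exact pvInner_mono k ds (by omega))]
      rw [pvInner_full, if_neg (by simp [hn]), pvSum_eq_foldl]

-- ===== VERDICT (by name: the statement is the Claim_ definition above) =====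
theorem solution_spec : Claim_equal_solution := by
  intro k dungeons _ _
  exact pv_main k (PySem.List.sorted dungeons (fun x => x) false)
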